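-- pv_equiv track=rewrite | github.com/shkim9604/Algorithm | 프로그래머스/LV1/옹알이 (2)/옹알이 (2).py | solution
-- ===== SOURCE A (Python) =====
-- def solution(babbling):
--     answer = 0
--     can = ["aya", "ye", "woo", "ma"]
--     for i in babbling:
--         index = 0
--         before = ''
--         while index < len(can):
--             if can[index] == i[:len(can[index])] and before != can[index]:
--                 i = i.replace(can[index], "", 1)
--                 before = can[index]
--                 index = 0
--             else:
--                 index += 1
--         if i == '':
--             answer += 1
--
--     return answer
-- ===== SOURCE B (Python) =====
-- def solution(babbling):
--     words = ("aya", "ye", "woo", "ma")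
--     count = 0
--     for s in babbling:
--         pos = 0
--         last = None
--         ok = True
--         while pos < len(s):
--             for w in words:
--                 if w != last and s.startswith(w, pos):
--                     pos += len(w)
--                     last = w
--                     break
--             else:
--                 ok = False
--                 break
--         if ok:
--             count += 1
--     return count
-- ===== Notes on version B (the rewrite author's own statement) =====
-- stated objective: alternative
-- what changed: Replaced A's replace-and-rescan loop (which rebuilds the string and resets the word index after every removed word) with a single forward scan over the string using a position pointer and last-word tracking.
import Mathlib
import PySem

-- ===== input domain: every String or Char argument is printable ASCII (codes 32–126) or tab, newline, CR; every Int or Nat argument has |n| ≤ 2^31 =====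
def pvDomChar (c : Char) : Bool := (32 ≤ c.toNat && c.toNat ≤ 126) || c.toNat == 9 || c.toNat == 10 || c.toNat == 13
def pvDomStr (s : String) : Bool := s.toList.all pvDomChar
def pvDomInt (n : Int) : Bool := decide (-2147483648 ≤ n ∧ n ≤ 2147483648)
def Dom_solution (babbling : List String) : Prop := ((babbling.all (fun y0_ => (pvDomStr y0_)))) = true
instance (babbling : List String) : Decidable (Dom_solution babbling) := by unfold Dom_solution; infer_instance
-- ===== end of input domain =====

-- B replaces A's replace-and-rescan word matching (rebuild string, reset index) by a
-- single forward scan with a position pointer and last-word tracking (objective: alternative).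

-- ===== PORT A =====
-- can = ["aya", "ye", "woo", "ma"] (as lists of chars; A manipulates strings, we port via List Char)
def pvCan : List (List Char) := [['a','y','a'], ['y','e'], ['w','o','o'], ['m','a']]

-- i.replace(w, "", 1): remove the first occurrence of w in s (exact hand port of Python's
-- str.replace with count 1 for nonempty w; for prefix matches it removes the leading w)
def pvReplaceOnce (s w : List Char) : List Char :=
  if s.take w.length = w then s.drop w.length
  else
    match s with
    | [] => []
    | c :: rest => c :: pvReplaceOnce rest w

-- termination helper for the port of A (cited in decreasing_by)
lemma pvReplaceOnce_len_lt (s w : List Char) (hw : w ≠ []) (h : s.take w.length = w) :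
    (pvReplaceOnce s w).length < s.length := by
  rw [pvReplaceOnce.eq_def, if_pos h]
  have hle : w.length ≤ s.length := by
    have := congrArg List.length h
    simp only [List.length_take] at this
    omega
  have hpos : w.length ≠ 0 := fun h0 => hw (List.eq_nil_of_length_eq_zero h0)
  simp only [List.length_drop]
  omega

-- the inner while loop of A: index scans pvCan, resetting to 0 after each removal
def pvAInner (i : List Char) (index : Nat) (before : List Char) : List Char :=
  if h : index < pvCan.length then
    if pvCan[index] = i.take (pvCan[index].length) ∧ before ≠ pvCan[index] then
      pvAInner (pvReplaceOnce i pvCan[index]) 0 pvCan[index]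
    else
      pvAInner i (index + 1) before
  else i
termination_by (i.length, pvCan.length - index)
decreasing_by
  · left
    rename_i hc
    refine pvReplaceOnce_len_lt _ _ ?_ hc.1.symm
    have h4 : index < 4 := by simpa [pvCan] using h
    interval_cases index <;> simp [pvCan]
  · exact Prod.Lex.right _ (by omega)

def solution (babbling : List String) : Int :=
  babbling.foldl
    (fun answer i =>
      if pvAInner i.toList 0 [] = [] then answer + 1 else answer)
    0

-- ===== PORT B =====
-- words = ("aya", "ye", "woo", "ma")
def pvWords : List (List Char) := [['a','y','a'], ['y','e'], ['w','o','o'], ['m','a']]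

-- the inner for-loop of B: first word in words that differs from last and matches at pos
def pvBStep (s : List Char) (last : Option (List Char)) : Option (List Char) :=
  pvWords.find? (fun w => decide (some w ≠ last) && decide (s.take w.length = w))

-- the while loop of B, the position pointer rendered as the remaining suffix
def pvBScan (s : List Char) (last : Option (List Char)) : Bool :=
  if hs : s = [] then true
  else
    match hm : pvBStep s last with
    | some w => pvBScan (s.drop w.length) (some w)
    | none => false
termination_by s.length
decreasing_by
  have hw : w ∈ pvWords := List.mem_of_find?_eq_some hm
  have : w.length ≠ 0 := by fin_cases hw <;> simp
  have : 0 < s.length := List.length_pos_iff.mpr hs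
  simp only [List.length_drop]
  omega

def solution_alt (babbling : List String) : Int :=
  babbling.foldl
    (fun count s => if pvBScan s.toList none then count + 1 else count)
    0

-- ===== PRECONDITION & SPEC =====
def Spec_solution (babbling : List String) (out : Int) : Prop := out = solution_alt babbling
instance (babbling : List String) (out : Int) : Decidable (Spec_solution babbling out) := by unfold Spec_solution; infer_instance

-- ===== CLAIM (what is proved, stated in full; the proofs are below) =====
def Claim_equal_solution : Prop := ∀ (babbling : List String), Dom_solution babbling → Spec_solution babbling (solution babbling)

-- ===== LEMMAS AND PROOFS =====

-- the 'before'/'last' correspondence: '' ↔ None, a consumed word ↔ itself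
def pvEncode (b : List Char) : Option (List Char) := if b = [] then none else some b

lemma pvWords_eq_pvCan : pvWords = pvCan := rfl

lemma pvCan_ne_nil : ∀ w ∈ pvCan, w ≠ [] := by decide

-- B's inner-loop condition agrees with A's, for a candidate word w and valid 'before'
lemma pvCond_equiv (i w b : List Char) (hw : w ≠ []) :
    ((decide (some w ≠ pvEncode b) && decide (i.take w.length = w)) = true) ↔
      (w = i.take w.length ∧ b ≠ w) := by
  unfold pvEncode
  rw [Bool.and_eq_true, decide_eq_true_iff, decide_eq_true_iff]
  by_cases hb : b = []
  · subst hb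
    rw [if_pos rfl]
    constructor
    · rintro ⟨-, h2⟩
      exact ⟨h2.symm, fun h => hw h.symm⟩
    · rintro ⟨h1, -⟩
      exact ⟨by simp, h1.symm⟩
  · rw [if_neg hb]
    constructor
    · rintro ⟨h1, h2⟩
      exact ⟨h2.symm, fun h => h1 (by rw [h])⟩
    · rintro ⟨h1, h2⟩
      refine ⟨fun hcon => h2 (Option.some.inj hcon).symm, h1.symm⟩

lemma pvGen : ∀ (i : List Char) (index : Nat) (b : List Char),
    (b = [] ∨ b ∈ pvCan) →
    (∀ j, j < index → ∀ (hj : j < pvCan.length),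
        ¬(pvCan[j] = i.take (pvCan[j].length) ∧ b ≠ pvCan[j])) →
    ((pvAInner i index b = []) ↔ (pvBScan i (pvEncode b) = true)) := by
  intro i index b
  induction i, index, b using pvAInner.induct with
  | case1 i index b h hc ih =>
    intro hb hbefore
    have hw : pvCan[index] ≠ [] := pvCan_ne_nil _ (List.getElem_mem h)
    have hi : i ≠ [] := by
      intro hnil
      apply hw
      rw [hc.1, hnil, List.take_nil]
    have hstep : pvBStep i (pvEncode b) = some pvCan[index] := by
      unfold pvBStep
      rw [pvWords_eq_pvCan, List.find?_eq_some_iff_getElem]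
      refine ⟨(pvCond_equiv i _ b hw).mpr hc, index, h, rfl, ?_⟩
      intro j hj
      simp only [Bool.not_eq_eq_eq_not, Bool.not_true]
      rw [Bool.eq_false_iff]
      intro hp
      exact hbefore j hj (by omega)
        ((pvCond_equiv i _ b (pvCan_ne_nil _ (List.getElem_mem (by omega)))).mp hp)
    have hrep : pvReplaceOnce i pvCan[index] = i.drop (pvCan[index].length) := by
      rw [pvReplaceOnce.eq_def, if_pos hc.1.symm]
    have henc : pvEncode pvCan[index] = some pvCan[index] := by
      unfold pvEncode; rw [if_neg hw]
    have hB : pvBScan i (pvEncode b)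
        = pvBScan (i.drop (pvCan[index].length)) (some pvCan[index]) := by
      rw [pvBScan, dif_neg hi]
      split
      · rename_i w hmw
        rw [hstep] at hmw
        cases Option.some.inj hmw
        rfl
      · rename_i hmn
        rw [hstep] at hmn
        cases hmn
    rw [pvAInner]
    simp only [dif_pos h, if_pos hc]
    rw [hB, ← henc, ← hrep]
    exact ih (Or.inr (List.getElem_mem h)) (by intro j hj; exact absurd hj (Nat.not_lt_zero j))
  | case2 i index b h hc ih =>
    intro hb hbefore
    rw [pvAInner]
    simp only [dif_pos h, if_neg hc]
    refine ih hb ?_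
    intro j hj hj4
    rcases Nat.lt_or_ge j index with hlt | hge
    · exact hbefore j hlt hj4
    · have : j = index := by omega
      subst this
      exact hc
  | case3 i index b h =>
    intro hb hbefore
    rw [pvAInner]
    simp only [dif_neg h]
    by_cases hi : i = []
    · subst hi
      rw [pvBScan]
      simp
    · have hstep : pvBStep i (pvEncode b) = none := by
        unfold pvBStep
        rw [pvWords_eq_pvCan, List.find?_eq_none]
        intro w hwmem hp
        obtain ⟨k, hk, rfl⟩ := List.mem_iff_getElem.mp hwmem
        exact hbefore k (by simp [pvCan] at hk h ⊢; omega) hk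
          ((pvCond_equiv i _ b (pvCan_ne_nil _ hwmem)).mp hp)
      have hB : pvBScan i (pvEncode b) = false := by
        rw [pvBScan, dif_neg hi]
        split
        · rename_i w hmw
          rw [hstep] at hmw
          cases hmw
        · rfl
      rw [hB]
      simp [hi]

lemma pvPoint (s : String) :
    (pvAInner s.toList 0 [] = []) ↔ (pvBScan s.toList none = true) := by
  have := pvGen s.toList 0 [] (Or.inl rfl) (by intro j hj; omega)
  simpa [pvEncode] using this

-- ===== VERDICT (by name: the statement is the Claim_ definition above) =====
theorem solution_spec : Claim_equal_solution := by
  intro babbling _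
  unfold Spec_solution solution solution_alt
  congr 1
  funext answer s
  by_cases hp : pvAInner s.toList 0 [] = []
  · rw [if_pos hp, if_pos ((pvPoint s).mp hp)]
  · rw [if_neg hp, if_neg (by intro hq; exact hp ((pvPoint s).mpr hq))]
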